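-- pv_equiv track=rewrite | github.com/Charelk2/booking-app | backend/app/utils/messages.py | parse_booking_details
-- ===== SOURCE A (Python) =====
-- from typing import Dict, Optional
--
-- BOOKING_DETAILS_PREFIX = "Booking details:"
--
-- def parse_booking_details(content: str) -> Dict[str, Optional[str]]:
--     """Parse a booking details system message into a dictionary."""
--     if not content.startswith(BOOKING_DETAILS_PREFIX):
--         return {}
--     details: Dict[str, Optional[str]] = {
--         "location": None,
--         "guests": None,
--         "venue_type": None,
--     }
--     lines = content.splitlines()[1:]
--     for line in lines:
--         if ":" not in line:
--             continue
--         key, value = line.split(":", 1)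
--         key = key.strip().lower().replace(" ", "_")
--         if key in details:
--             details[key] = value.strip() or None
--     return details
-- ===== SOURCE B (Python) =====
-- BOOKING_DETAILS_PREFIX = "Booking details:"
--
-- def parse_booking_details(content):
--     """Per-key backward search: for each of the three fixed keys, scan the
--     detail lines from the END and take the first matching line (= A's
--     last-wins); no dict accumulator is maintained at all."""
--     if not content.startswith(BOOKING_DETAILS_PREFIX):
--         return {}
--     lines = content.splitlines()[1:]
--
--     def lookup(target):
--         for line in reversed(lines):
--             if ":" in line:
--                 key, value = line.split(":", 1)
--                 if key.strip().lower().replace(" ", "_") == target: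
--                     return value.strip() or None
--         return None
--
--     return {k: lookup(k) for k in ("location", "guests", "venue_type")}
-- ===== Notes on version B (the rewrite author's own statement) =====
-- stated objective: alternative
-- what changed: B drops A's forward fold over a pre-seeded dict: for each of the three fixed keys it scans the detail lines backwards and returns the first match (equivalent to A's last-wins overwrite), so no dictionary accumulator exists at all.
import Mathlib
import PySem

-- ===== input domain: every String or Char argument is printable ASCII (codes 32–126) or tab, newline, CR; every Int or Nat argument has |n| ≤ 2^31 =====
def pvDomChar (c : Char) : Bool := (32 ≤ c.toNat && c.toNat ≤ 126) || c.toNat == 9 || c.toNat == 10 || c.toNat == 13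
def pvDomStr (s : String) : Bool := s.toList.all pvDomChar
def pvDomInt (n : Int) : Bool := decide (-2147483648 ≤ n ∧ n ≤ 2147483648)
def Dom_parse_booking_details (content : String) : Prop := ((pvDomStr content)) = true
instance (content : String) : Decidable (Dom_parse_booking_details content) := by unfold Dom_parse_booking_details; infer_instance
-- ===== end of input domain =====

-- B replaces A's forward fold over a pre-seeded dict by a per-key backward scan (first match from the end = A's last-wins); same cost, different algorithmic shape.

-- ===== PORT A =====
-- the body of A's for-loop (one line processed against the seeded dict)
def pvStepA (d : PySem.Dict String (Option String)) (line : String) : PySem.Dict String (Option String) :=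
  if PySem.Str.isIn ":" line then
    match PySem.Str.splitMax? line ":" 1 with
    | some (key :: value :: _) =>
      let key := PySem.Str.replace (PySem.Str.lower (PySem.Str.strip key)) " " "_"
      if d.contains key then
        d.insert key (let v := PySem.Str.strip value; if v = "" then none else some v)
      else d
    | _ => d
  else d

def parse_booking_details (content : String) : List (String × Option String) :=
  if !(PySem.Str.startswith content "Booking details:") then []
  else
    let details : PySem.Dict String (Option String) :=
      PySem.Dict.ofList [("location", none), ("guests", none), ("venue_type", none)]
    -- splitlines()[1:] : dropping the first element is exact for the slice [1:]
    let lines := (PySem.Str.splitlines content).drop 1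
    (lines.foldl pvStepA details).items

-- ===== PORT B =====
-- B's inner `lookup(target)`: walk `reversed(lines)` (here: lines.reverse, structurally) and return on the first matching line
def pvLookup (target : String) : List String → Option String
  | [] => none
  | line :: rest =>
    if PySem.Str.isIn ":" line then
      match PySem.Str.splitMax? line ":" 1 with
      | some (key :: value :: _) =>
        if PySem.Str.replace (PySem.Str.lower (PySem.Str.strip key)) " " "_" = target then
          (let v := PySem.Str.strip value; if v = "" then none else some v)
        else pvLookup target rest
      | _ => pvLookup target rest
    else pvLookup target rest

def parse_booking_details_alt (content : String) : List (String × Option String) :=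
  if !(PySem.Str.startswith content "Booking details:") then []
  else
    let lines := (PySem.Str.splitlines content).drop 1
    [("location", pvLookup "location" lines.reverse),
     ("guests", pvLookup "guests" lines.reverse),
     ("venue_type", pvLookup "venue_type" lines.reverse)]

-- ===== PRECONDITION & SPEC =====
def Spec_parse_booking_details (content : String) (out : List (String × Option String)) : Prop := out = parse_booking_details_alt content
instance (content : String) (out : List (String × Option String)) : Decidable (Spec_parse_booking_details content out) := by unfold Spec_parse_booking_details; infer_instance

-- ===== CLAIM =====
def Claim_equal_parse_booking_details : Prop := ∀ (content : String), Dom_parse_booking_details content → Spec_parse_booking_details content (parse_booking_details content)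

-- ===== LEMMAS AND PROOFS =====

-- one line parsed into (normalized key, stored value), none if the line is skipped
def pvParseLine (line : String) : Option (String × Option String) :=
  if PySem.Str.isIn ":" line then
    match PySem.Str.splitMax? line ":" 1 with
    | some (key :: value :: _) =>
      some (PySem.Str.replace (PySem.Str.lower (PySem.Str.strip key)) " " "_",
            (let v := PySem.Str.strip value; if v = "" then none else some v))
    | _ => none
  else none

-- first match in the given order, distinguishing "not found" from "found None"
def pvFind (target : String) : List String → Option (Option String)
  | [] => none
  | l :: rest =>
    match pvParseLine l with
    | some (k, v) => if k = target then some v else pvFind target rest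
    | none => pvFind target rest

lemma pvLookup_eq_find (target : String) (ls : List String) :
    pvLookup target ls = (pvFind target ls).getD none := by
  induction ls with
  | nil => rfl
  | cons l rest ih =>
    unfold pvLookup pvFind pvParseLine
    by_cases h : PySem.Str.isIn ":" l = true
    · rw [if_pos h, if_pos h]
      cases hs : PySem.Str.splitMax? l ":" 1 with
      | none => exact ih
      | some parts =>
        match parts with
        | [] => exact ih
        | [_] => exact ih
        | key :: value :: _ =>
          by_cases hk : PySem.Str.replace (PySem.Str.lower (PySem.Str.strip key)) " " "_" = target
          · simp [hk]
          · simp [hk, ih]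
    · rw [if_neg h, if_neg h]; exact ih

lemma pvFind_append (target : String) (l1 l2 : List String) :
    pvFind target (l1 ++ l2) = (pvFind target l1).or (pvFind target l2) := by
  induction l1 with
  | nil => rfl
  | cons x xs ih =>
    simp only [List.cons_append, pvFind]
    cases hp : pvParseLine x with
    | none => simp [ih]
    | some p =>
      obtain ⟨k, v⟩ := p
      by_cases hk : k = target
      · simp [hk]
      · simp [hk, ih]

lemma pvStepA_eq (d : PySem.Dict String (Option String)) (line : String) :
    pvStepA d line =
      match pvParseLine line with
      | some (k, v) => if d.contains k then d.insert k v else d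
      | none => d := by
  unfold pvStepA pvParseLine
  by_cases h : PySem.Str.isIn ":" line = true
  · rw [if_pos h, if_pos h]
    cases hs : PySem.Str.splitMax? line ":" 1 with
    | none => rfl
    | some parts =>
      match parts with
      | [] => rfl
      | [_] => rfl
      | key :: value :: _ => rfl
  · rw [if_neg h, if_neg h]

-- the fold over A's seeded three-key dict, characterised by backward first-match
lemma pvFold_char (lines : List String) (a b c : Option String) :
    lines.foldl pvStepA (PySem.Dict.mk [("location", a), ("guests", b), ("venue_type", c)]) =
      PySem.Dict.mk [("location", (pvFind "location" lines.reverse).getD a),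
                     ("guests", (pvFind "guests" lines.reverse).getD b),
                     ("venue_type", (pvFind "venue_type" lines.reverse).getD c)] := by
  induction lines generalizing a b c with
  | nil => rfl
  | cons x xs ih =>
    rw [List.foldl_cons, pvStepA_eq, List.reverse_cons, pvFind_append, pvFind_append, pvFind_append]
    cases hp : pvParseLine x with
    | none =>
      have hnone : ∀ t, pvFind t [x] = none := by
        intro t; unfold pvFind; rw [hp]; rfl
      simp only [hnone, Option.or_none]
      exact ih a b c
    | some p =>
      obtain ⟨k, v⟩ := p
      have hone : ∀ t, pvFind t [x] = if k = t then some v else none := by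
        intro t; unfold pvFind; rw [hp]
        by_cases hk : k = t
        · simp [hk]
        · simp [hk]; rfl
      by_cases h1 : k = "location"
      · subst h1
        have hc : (PySem.Dict.mk [("location", a), ("guests", b), ("venue_type", c)]).insert "location" v =
            PySem.Dict.mk [("location", v), ("guests", b), ("venue_type", c)] := by
          apply PySem.Dict.ext
          simp [PySem.Dict.items_insert]
        simp only [show (PySem.Dict.mk [("location", a), ("guests", b), ("venue_type", c)]).contains "location" = true from by simp,
          if_pos, hc, ih]
        rw [hone "location", hone "guests", hone "venue_type"]
        simp
      · by_cases h2 : k = "guests"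
        · subst h2
          have hc : (PySem.Dict.mk [("location", a), ("guests", b), ("venue_type", c)]).insert "guests" v =
              PySem.Dict.mk [("location", a), ("guests", v), ("venue_type", c)] := by
            apply PySem.Dict.ext
            simp [PySem.Dict.items_insert]
          simp only [show (PySem.Dict.mk [("location", a), ("guests", b), ("venue_type", c)]).contains "guests" = true from by simp,
            if_pos, hc, ih]
          rw [hone "location", hone "guests", hone "venue_type"]
          simp
        · by_cases h3 : k = "venue_type"
          · subst h3
            have hc : (PySem.Dict.mk [("location", a), ("guests", b), ("venue_type", c)]).insert "venue_type" v =
                PySem.Dict.mk [("location", a), ("guests", b), ("venue_type", v)] := by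
              apply PySem.Dict.ext
              simp [PySem.Dict.items_insert]
            simp only [show (PySem.Dict.mk [("location", a), ("guests", b), ("venue_type", c)]).contains "venue_type" = true from by simp,
              if_pos, hc, ih]
            rw [hone "location", hone "guests", hone "venue_type"]
            simp
          · have hc : (PySem.Dict.mk [("location", a), ("guests", b), ("venue_type", c)]).contains k = false := by
              simp
              exact ⟨Ne.symm h1, Ne.symm h2, Ne.symm h3⟩
            simp only [hc, Bool.false_eq_true, if_false]
            rw [hone "location", hone "guests", hone "venue_type",
              if_neg h1, if_neg h2, if_neg h3]
            simp only [Option.or_none]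
            exact ih a b c

-- ===== VERDICT =====
theorem parse_booking_details_spec : Claim_equal_parse_booking_details := by
  intro content _
  unfold Spec_parse_booking_details parse_booking_details parse_booking_details_alt
  by_cases h : PySem.Str.startswith content "Booking details:" = true
  · rw [h]
    have h0 : (PySem.Dict.ofList [("location", (none : Option String)), ("guests", none), ("venue_type", none)]) =
        PySem.Dict.mk [("location", none), ("guests", none), ("venue_type", none)] := by decide
    simp only [Bool.not_true, Bool.false_eq_true, if_false, h0,
      pvFold_char ((PySem.Str.splitlines content).drop 1) none none none,
      pvLookup_eq_find]
  · rw [Bool.not_eq_true] at h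
    rw [h]
    simp
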